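-- pv_equiv track=rewrite | github.com/khatoan/chingchong-project | Đề 2020/Number of Ways to Sum/Recursive_versionWithMemo.py | countRecur
-- ===== SOURCE A (Python) =====
-- def countRecur(n, memo):
--
--     # base case
--     if n < 0:
--         return 0
--     if n == 0:
--         return 1
--
--     # If value is memoized
--     if memo[n] != -1:
--         return memo[n]
--
--     # Memoize the state
--     memo[n] = (
--         countRecur(n - 1, memo) + countRecur(n - 3, memo) + countRecur(n - 5, memo)
--     )
--
--     return memo[n]
-- ===== SOURCE B (Python) =====
-- def countRecur(n, memo):
--     # Bottom-up DP over the initial memo (read-only); same return value as the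
--     # memoized recursion, but iterative and without mutating memo.
--     if n < 0:
--         return 0
--     dp = [1]
--     for k in range(1, n + 1):
--         v = memo[k]
--         if v != -1:
--             dp.append(v)
--         else:
--             dp.append(dp[k - 1]
--                       + (dp[k - 3] if k >= 3 else 0)
--                       + (dp[k - 5] if k >= 5 else 0))
--     return dp[n]
-- ===== Notes on version B (the rewrite author's own statement) =====
-- stated objective: alternative
-- what changed: Replaced the top-down memoized recursion that mutates memo in place with a bottom-up iterative DP that builds a fresh table while treating the initial memo entries (!= -1) as overrides; no recursion and no mutation of memo.
import Mathlib
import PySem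

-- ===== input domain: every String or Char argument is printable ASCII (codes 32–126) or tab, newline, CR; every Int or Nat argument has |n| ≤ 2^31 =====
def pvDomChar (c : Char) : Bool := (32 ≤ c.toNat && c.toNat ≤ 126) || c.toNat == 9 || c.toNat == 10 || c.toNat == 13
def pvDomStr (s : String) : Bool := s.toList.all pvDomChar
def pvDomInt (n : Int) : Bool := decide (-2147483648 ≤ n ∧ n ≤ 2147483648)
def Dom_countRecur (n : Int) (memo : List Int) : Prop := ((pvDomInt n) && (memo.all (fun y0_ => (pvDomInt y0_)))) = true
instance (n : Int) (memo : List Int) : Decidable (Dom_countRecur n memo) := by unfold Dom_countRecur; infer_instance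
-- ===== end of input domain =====

-- B replaces the mutating memoized recursion by a bottom-up iterative DP over a fresh table
-- (alternative decomposition, same cost); the equivalence is about the RETURN value only:
-- A mutates memo in place, B does not.

-- ===== PORT A =====
-- Threads the mutable memo list through the recursion; first component is the returned value.
def countRecurGo (n : Int) (memo : List Int) : Int × List Int :=
  if n < 0 then (0, memo)
  else if n = 0 then (1, memo)
  else
    let v := PySem.List.pyGetD memo n 0
    if v ≠ -1 then (v, memo)
    else
      let r1 := countRecurGo (n - 1) memo
      let r2 := countRecurGo (n - 3) r1.2
      let r3 := countRecurGo (n - 5) r2.2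
      let s := r1.1 + r2.1 + r3.1
      (s, PySem.List.pySetD r3.2 n s)
termination_by n.toNat
decreasing_by all_goals omega

def countRecur (n : Int) (memo : List Int) : Int := (countRecurGo n memo).1

-- ===== PORT B =====
def countRecur_alt (n : Int) (memo : List Int) : Int :=
  if n < 0 then 0
  else
    let dp := (PySem.List.pyRange 1 (n + 1) 1).foldl (fun dp k =>
      let v := PySem.List.pyGetD memo k 0
      if v ≠ -1 then dp ++ [v]
      else dp ++ [PySem.List.pyGetD dp (k - 1) 0
                  + (if 3 ≤ k then PySem.List.pyGetD dp (k - 3) 0 else 0)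
                  + (if 5 ≤ k then PySem.List.pyGetD dp (k - 5) 0 else 0)]) [1]
    PySem.List.pyGetD dp n 0

-- ===== PRECONDITION & SPEC =====
-- Pre_ excludes exactly the inputs where Python raises IndexError (memo[n] with 1 ≤ n and
-- n ≥ len(memo)); both A and B raise there.
def Pre_countRecur (n : Int) (memo : List Int) : Prop := 1 ≤ n → n < (memo.length : Int)
instance (n : Int) (memo : List Int) : Decidable (Pre_countRecur n memo) := by
  unfold Pre_countRecur; infer_instance

def pvWitness_countRecur : Int × List Int := (3, [-1, -1, -1, -1])

def Spec_countRecur (n : Int) (memo : List Int) (out : Int) : Prop := out = countRecur_alt n memo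
instance (n : Int) (memo : List Int) (out : Int) : Decidable (Spec_countRecur n memo out) := by
  unfold Spec_countRecur; infer_instance

-- ===== CLAIM (what is proved, stated in full; the proofs are below) =====
def Claim_equal_countRecur : Prop := ∀ (n : Int) (memo : List Int), Dom_countRecur n memo → Pre_countRecur n memo → Spec_countRecur n memo (countRecur n memo)

-- ===== LEMMAS AND PROOFS =====

-- pure recurrence over the INITIAL memo: the common specification of both ports
def fpure (memo : List Int) (n : Int) : Int :=
  if n < 0 then 0
  else if n = 0 then 1
  else
    let v := PySem.List.pyGetD memo n 0
    if v ≠ -1 then v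
    else fpure memo (n - 1) + fpure memo (n - 3) + fpure memo (n - 5)
termination_by n.toNat
decreasing_by all_goals omega

lemma pyGetD_toNat (xs : List Int) (i : Int) (d : Int) (h : 0 ≤ i) :
    PySem.List.pyGetD xs i d = xs.getD i.toNat d := by
  simp [PySem.List.pyGetD, PySem.List.pyGet?_of_nonneg xs h, List.getD_eq_getElem?_getD]

-- invariant: m agrees with memo0 except that some cells with memo0-value -1 hold their fpure value
def Agree (memo0 m : List Int) : Prop :=
  m.length = memo0.length ∧
  ∀ j : Nat, m.getD j 0 = memo0.getD j 0 ∨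
    (memo0.getD j 0 = -1 ∧ m.getD j 0 = fpure memo0 (j : Int))

lemma fpure_neg (memo : List Int) (n : Int) (h : n < 0) : fpure memo n = 0 := by
  rw [fpure]; simp [h]

lemma fpure_zero (memo : List Int) : fpure memo 0 = 1 := by
  rw [fpure]; norm_num

lemma getD_map_fpure (memo : List Int) (N k : Nat) (hk : k < N) :
    PySem.List.pyGetD ((List.range N).map (fun j : Nat => fpure memo (j : Int))) (k : Int) 0
      = fpure memo (k : Int) := by
  rw [pyGetD_toNat _ _ _ (Int.natCast_nonneg k)]
  simp only [Int.toNat_natCast]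
  exact PySem.List.getD_map_range _ N k 0 hk

lemma go_spec_aux (memo0 : List Int) : ∀ (N : Nat) (n : Int) (m : List Int),
    n.toNat ≤ N → Agree memo0 m →
    ((countRecurGo n m).1 = fpure memo0 n ∧ Agree memo0 (countRecurGo n m).2) := by
  intro N
  induction N with
  | zero =>
    intro n m hN hA
    rw [countRecurGo, fpure]
    by_cases h0 : n < 0
    · simpa [h0] using hA
    · have h1 : n = 0 := by omega
      simpa [h0, h1] using hA
  | succ N ih =>
    intro n m hN hA
    by_cases h0 : n < 0
    · rw [countRecurGo, fpure]; simpa [h0] using hA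
    by_cases h1 : n = 0
    · rw [countRecurGo, fpure]; simpa [h0, h1] using hA
    obtain ⟨hlen, hj⟩ := hA
    have hn1 : (1:Int) ≤ n := by omega
    have hcast : ((n.toNat : Int)) = n := Int.toNat_of_nonneg (by omega)
    have hmn : PySem.List.pyGetD m n 0 = m.getD n.toNat 0 := pyGetD_toNat _ _ _ (by omega)
    have hmemn : PySem.List.pyGetD memo0 n 0 = memo0.getD n.toNat 0 := pyGetD_toNat _ _ _ (by omega)
    rw [countRecurGo, fpure]
    simp only [if_neg h0, if_neg h1]
    by_cases hv : PySem.List.pyGetD m n 0 = -1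
    · -- not memoized in m: recurse
      have hm0 : memo0.getD n.toNat 0 = -1 := by
        rcases hj n.toNat with hsame | ⟨hm1, _⟩
        · rw [← hsame, ← hmn]; exact hv
        · exact hm1
      have hv0 : ¬ (PySem.List.pyGetD memo0 n 0 ≠ -1) := by
        rw [hmemn]; simp only [hm0]; simp
      simp only [hv, if_neg hv0, ne_eq, not_true_eq_false, if_false]
      have ha := ih (n - 1) m (by omega) ⟨hlen, hj⟩
      have hb := ih (n - 3) (countRecurGo (n - 1) m).2 (by omega) ha.2
      have hc := ih (n - 5) (countRecurGo (n - 3) (countRecurGo (n - 1) m).2).2 (by omega) hb.2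
      obtain ⟨hlen3, hj3⟩ := hc.2
      have hsum : (countRecurGo (n - 1) m).1
          + (countRecurGo (n - 3) (countRecurGo (n - 1) m).2).1
          + (countRecurGo (n - 5) (countRecurGo (n - 3) (countRecurGo (n - 1) m).2).2).1
          = fpure memo0 (n - 1) + fpure memo0 (n - 3) + fpure memo0 (n - 5) := by
        rw [ha.1, hb.1, hc.1]
      refine ⟨hsum, ?_, ?_⟩
      · rw [PySem.List.pySetD_of_nonneg _ _ (by omega : (0:Int) ≤ n)]
        simp [hlen3]
      · intro j
        rw [PySem.List.pySetD_of_nonneg _ _ (by omega : (0:Int) ≤ n)]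
        by_cases hje : j = n.toNat
        · subst hje
          by_cases hlt : n.toNat < (countRecurGo (n - 5)
              (countRecurGo (n - 3) (countRecurGo (n - 1) m).2).2).2.length
          · right
            refine ⟨hm0, ?_⟩
            have : fpure memo0 ((n.toNat : Int)) = fpure memo0 (n - 1) + fpure memo0 (n - 3)
                + fpure memo0 (n - 5) := by
              rw [hcast, fpure]
              simp only [if_neg h0, if_neg h1, hmemn]
              simp only [hm0]; simp
            rw [this, ← hsum]
            simp [List.getD_eq_getElem?_getD, List.getElem?_set_self hlt]
          · rw [List.set_eq_of_length_le (by omega)]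
            exact hj3 n.toNat
        · have := List.getElem?_set_ne (l := (countRecurGo (n - 5)
              (countRecurGo (n - 3) (countRecurGo (n - 1) m).2).2).2)
              (a := (countRecurGo (n - 1) m).1
                + (countRecurGo (n - 3) (countRecurGo (n - 1) m).2).1
                + (countRecurGo (n - 5)
                  (countRecurGo (n - 3) (countRecurGo (n - 1) m).2).2).1)
              (h := fun h => hje h.symm)
          rw [List.getD_eq_getElem?_getD, this, ← List.getD_eq_getElem?_getD]
          exact hj3 j
    · -- memoized: return m[n]
      simp only [ne_eq, hv, not_false_eq_true, if_pos]
      rcases hj n.toNat with hsame | ⟨hm1, hfp⟩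
      · have hne : PySem.List.pyGetD memo0 n 0 ≠ -1 := by
          rw [hmemn, ← hsame, ← hmn]; exact hv
        refine ⟨?_, hlen, hj⟩
        simp only [hne, not_false_eq_true, if_pos]
        rw [hmn, hsame, ← hmemn]
      · refine ⟨?_, hlen, hj⟩
        have : PySem.List.pyGetD m n 0 = fpure memo0 n := by rw [hmn, hfp, hcast]
        rw [this]
        rw [fpure]
        simp [if_neg h0, if_neg h1]

lemma go_spec (memo0 : List Int) (n : Int) (m : List Int) (hA : Agree memo0 m) :
    (countRecurGo n m).1 = fpure memo0 n ∧ Agree memo0 (countRecurGo n m).2 :=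
  go_spec_aux memo0 n.toNat n m le_rfl hA

theorem countRecur_eq_fpure (n : Int) (memo : List Int) : countRecur n memo = fpure memo n := by
  have h := go_spec memo n memo ⟨rfl, fun j => Or.inl rfl⟩
  simpa [countRecur] using h.1

lemma dp_eq (memo : List Int) (m : Nat) :
    (PySem.List.pyRange 1 ((m : Int) + 1) 1).foldl (fun dp k =>
      let v := PySem.List.pyGetD memo k 0
      if v ≠ -1 then dp ++ [v]
      else dp ++ [PySem.List.pyGetD dp (k - 1) 0
                  + (if 3 ≤ k then PySem.List.pyGetD dp (k - 3) 0 else 0)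
                  + (if 5 ≤ k then PySem.List.pyGetD dp (k - 5) 0 else 0)]) [1]
      = (List.range (m + 1)).map (fun j : Nat => fpure memo (j : Int)) := by
  induction m with
  | zero =>
    rw [PySem.List.pyRange_one_eq_nil (by norm_num)]
    simp [fpure_zero]
  | succ m ih =>
    have hsplit : PySem.List.pyRange 1 (((m + 1 : Nat) : Int) + 1) 1
        = PySem.List.pyRange 1 ((m : Int) + 1) 1 ++ [(m : Int) + 1] := by
      have := PySem.List.pyRange_one_succ_right (a := 1) (b := (m : Int) + 1) (by omega)
      rw [← this]; push_cast; ring_nf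
    rw [hsplit, List.foldl_append, ih]
    simp only [List.foldl_cons, List.foldl_nil]
    have harg : (((m + 1 : Nat)) : Int) = (m : Int) + 1 := by push_cast; ring
    have hr : (List.range (m + 1 + 1)).map (fun j : Nat => fpure memo (j : Int))
        = ((List.range (m + 1)).map (fun j : Nat => fpure memo (j : Int)))
          ++ [fpure memo ((m : Int) + 1)] := by
      rw [List.range_succ, List.map_append]
      simp [harg]
    rw [hr]
    have hm1 : ¬ ((m : Int) + 1 < 0) := by omega
    have hm2 : ¬ ((m : Int) + 1 = 0) := by omega
    by_cases hv : PySem.List.pyGetD memo ((m : Int) + 1) 0 = -1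
    · have hf : fpure memo ((m : Int) + 1)
          = fpure memo ((m : Int) + 1 - 1) + fpure memo ((m : Int) + 1 - 3)
            + fpure memo ((m : Int) + 1 - 5) := by
        rw [fpure]; simp only [if_neg hm1, if_neg hm2]; simp [hv]
      have e1 : PySem.List.pyGetD ((List.range (m + 1)).map
            (fun j : Nat => fpure memo (j : Int))) ((m : Int) + 1 - 1) 0
          = fpure memo ((m : Int) + 1 - 1) := by
        have h : ((m : Int) + 1 - 1) = ((m : Nat) : Int) := by ring
        rw [h]; exact getD_map_fpure memo (m + 1) m (by omega)
      have e3 : (if 3 ≤ (m : Int) + 1 then PySem.List.pyGetD ((List.range (m + 1)).map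
            (fun j : Nat => fpure memo (j : Int))) ((m : Int) + 1 - 3) 0 else 0)
          = fpure memo ((m : Int) + 1 - 3) := by
        by_cases h3 : 3 ≤ (m : Int) + 1
        · rw [if_pos h3]
          have h : ((m : Int) + 1 - 3) = (((m - 2 : Nat)) : Int) := by
            have : 2 ≤ m := by omega
            push_cast [this]; ring
          rw [h]; exact getD_map_fpure memo (m + 1) (m - 2) (by omega)
        · rw [if_neg h3, fpure_neg memo _ (by omega)]
      have e5 : (if 5 ≤ (m : Int) + 1 then PySem.List.pyGetD ((List.range (m + 1)).map
            (fun j : Nat => fpure memo (j : Int))) ((m : Int) + 1 - 5) 0 else 0)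
          = fpure memo ((m : Int) + 1 - 5) := by
        by_cases h5 : 5 ≤ (m : Int) + 1
        · rw [if_pos h5]
          have h : ((m : Int) + 1 - 5) = (((m - 4 : Nat)) : Int) := by
            have : 4 ≤ m := by omega
            push_cast [this]; ring
          rw [h]; exact getD_map_fpure memo (m + 1) (m - 4) (by omega)
        · rw [if_neg h5, fpure_neg memo _ (by omega)]
      simp only [hv, ne_eq, not_true_eq_false, if_false, e1, e3, e5]
      rw [← hf]
    · have hf : fpure memo ((m : Int) + 1) = PySem.List.pyGetD memo ((m : Int) + 1) 0 := by
        rw [fpure]; simp only [if_neg hm1, if_neg hm2]; simp [hv]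
      simp only [ne_eq, hv, not_false_eq_true, if_pos]
      rw [← hf]

theorem alt_eq_fpure (n : Int) (memo : List Int) : countRecur_alt n memo = fpure memo n := by
  by_cases h0 : n < 0
  · rw [countRecur_alt, fpure]; simp [h0]
  · have hcast : ((n.toNat : Int)) = n := Int.toNat_of_nonneg (by omega)
    rw [countRecur_alt, if_neg h0, ← hcast, dp_eq]
    exact getD_map_fpure memo (n.toNat + 1) n.toNat (by omega)

-- ===== VERDICT (by name: the statement is the Claim_ definition above) =====
theorem countRecur_spec : Claim_equal_countRecur := by
  intro n memo _ _
  unfold Spec_countRecur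
  rw [countRecur_eq_fpure, alt_eq_fpure]
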